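-- pv_equiv track=rewrite | github.com/MiguelCarapaz/Backend-Saturnina | app/routers/user.py | normalize_password_payload
-- ===== SOURCE A (Python) =====
-- from typing import Optional, Dict, Any
--
-- def normalize_password_payload(payload: Dict[str, Any]) -> Dict[str, Optional[str]]:
--     """Mapea posibles campos entrantes a current_password, new_password, confirm_password."""
--     mapped = {
--         "current_password": None,
--         "new_password": None,
--         "confirm_password": None
--     }
--
--     # posibles claves para cada campo
--     current_keys = ["current_password", "currentPassword", "current"]
--     new_keys = ["new_password", "newPassword", "new", "password"]
--     confirm_keys = ["confirm_password", "confirmPassword", "confirm", "check_password", "checkPassword", "check"]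
--
--     for k in current_keys:
--         if k in payload and payload.get(k) is not None:
--             mapped["current_password"] = payload.get(k)
--             break
--
--     for k in new_keys:
--         if k in payload and payload.get(k) is not None:
--             mapped["new_password"] = payload.get(k)
--             break
--
--     for k in confirm_keys:
--         if k in payload and payload.get(k) is not None:
--             mapped["confirm_password"] = payload.get(k)
--             break
--
--     return mapped
-- ===== SOURCE B (Python) =====
-- # Reverse index: one alias->(field, rank) table, a single pass over the payload
-- # keeping the lowest-ranked non-None hit per field.
-- ALIAS = {
--     "current_password": ("current_password", 0),
--     "currentPassword": ("current_password", 1),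
--     "current": ("current_password", 2),
--     "new_password": ("new_password", 0),
--     "newPassword": ("new_password", 1),
--     "new": ("new_password", 2),
--     "password": ("new_password", 3),
--     "confirm_password": ("confirm_password", 0),
--     "confirmPassword": ("confirm_password", 1),
--     "confirm": ("confirm_password", 2),
--     "check_password": ("confirm_password", 3),
--     "checkPassword": ("confirm_password", 4),
--     "check": ("confirm_password", 5),
-- }
--
-- def normalize_password_payload(payload):
--     best = {}  # field -> (rank, value)
--     for k, v in payload.items():
--         if v is None:
--             continue
--         t = ALIAS.get(k)
--         if t is None:
--             continue
--         field, rank = t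
--         cur = best.get(field)
--         if cur is None or rank < cur[0]:
--             best[field] = (rank, v)
--     return {f: (best[f][1] if f in best else None)
--             for f in ("current_password", "new_password", "confirm_password")}
-- ===== Notes on version B (the rewrite author's own statement) =====
-- stated objective: alternative
-- what changed: Replaces A's three per-field scans of fixed candidate-key lists against the payload by a reverse alias->(field,rank) index and a single pass over the payload items keeping the minimum-rank non-None value per field.
import Mathlib
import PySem

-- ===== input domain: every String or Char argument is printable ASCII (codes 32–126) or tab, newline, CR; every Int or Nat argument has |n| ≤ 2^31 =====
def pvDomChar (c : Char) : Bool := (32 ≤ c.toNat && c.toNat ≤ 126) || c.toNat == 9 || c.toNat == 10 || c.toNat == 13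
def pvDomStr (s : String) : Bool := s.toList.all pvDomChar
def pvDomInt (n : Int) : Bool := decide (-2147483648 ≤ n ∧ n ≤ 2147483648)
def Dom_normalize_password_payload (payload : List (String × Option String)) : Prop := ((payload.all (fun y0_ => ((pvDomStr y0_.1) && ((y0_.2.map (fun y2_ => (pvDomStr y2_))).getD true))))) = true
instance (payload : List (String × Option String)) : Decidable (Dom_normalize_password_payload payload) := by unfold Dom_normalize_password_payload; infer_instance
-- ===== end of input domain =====

-- B replaces A's three per-field candidate scans by a reverse alias->(field,rank) index and
-- a single pass over the payload items keeping the minimum-rank non-None value per field (objective: alternative).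


-- ===== PORT A =====
-- 'for k in keys: if k in payload and payload.get(k) is not None: mapped[field] = payload.get(k); break'
def fillA (pl : PySem.Dict String (Option String)) (field : String)
    (d : PySem.Dict String (Option String)) : List String → PySem.Dict String (Option String)
  | [] => d
  | k :: ks =>
      if pl.contains k && (pl.getD k none).isSome then d.insert field (pl.getD k none)
      else fillA pl field d ks

def normalize_password_payload (payload : List (String × Option String)) : List (String × Option String) :=
  let pl := PySem.Dict.ofList payload
  let mapped : PySem.Dict String (Option String) :=
    PySem.Dict.ofList [("current_password", none), ("new_password", none), ("confirm_password", none)]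
  let current_keys := ["current_password", "currentPassword", "current"]
  let new_keys := ["new_password", "newPassword", "new", "password"]
  let confirm_keys := ["confirm_password", "confirmPassword", "confirm", "check_password", "checkPassword", "check"]
  let mapped := fillA pl "current_password" mapped current_keys
  let mapped := fillA pl "new_password" mapped new_keys
  let mapped := fillA pl "confirm_password" mapped confirm_keys
  mapped.items

-- ===== PORT B =====
-- ALIAS: reverse index alias -> (field, rank)
def pvALIAS : List (String × String × Nat) :=
  [("current_password", ("current_password", 0)),
   ("currentPassword", ("current_password", 1)),
   ("current", ("current_password", 2)),
   ("new_password", ("new_password", 0)),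
   ("newPassword", ("new_password", 1)),
   ("new", ("new_password", 2)),
   ("password", ("new_password", 3)),
   ("confirm_password", ("confirm_password", 0)),
   ("confirmPassword", ("confirm_password", 1)),
   ("confirm", ("confirm_password", 2)),
   ("check_password", ("confirm_password", 3)),
   ("checkPassword", ("confirm_password", 4)),
   ("check", ("confirm_password", 5))]

-- loop body: skip None values and non-alias keys; keep the lower-ranked hit per field
def bStep (best : PySem.Dict String (Nat × String)) (kv : String × Option String) :
    PySem.Dict String (Nat × String) :=
  match kv.2 with
  | none => best
  | some v =>
    match (PySem.Dict.ofList pvALIAS).get? kv.1 with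
    | none => best
    | some (field, rank) =>
      match best.get? field with
      | none => best.insert field (rank, v)
      | some (rank0, _) => if rank < rank0 then best.insert field (rank, v) else best

def normalize_password_payload_alt (payload : List (String × Option String)) : List (String × Option String) :=
  let pl := PySem.Dict.ofList payload
  let best := pl.items.foldl bStep PySem.Dict.empty
  ["current_password", "new_password", "confirm_password"].map
    (fun f => (f, (best.get? f).map (·.2)))

-- ===== PRECONDITION & SPEC =====
def Spec_normalize_password_payload (payload : List (String × Option String)) (out : List (String × Option String)) : Prop := out = normalize_password_payload_alt payload
instance (payload : List (String × Option String)) (out : List (String × Option String)) : Decidable (Spec_normalize_password_payload payload out) := by unfold Spec_normalize_password_payload; infer_instance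

-- ===== CLAIM (what is proved, stated in full; the proofs are below) =====
def Claim_equal_normalize_password_payload : Prop := ∀ (payload : List (String × Option String)), Dom_normalize_password_payload payload → Spec_normalize_password_payload payload (normalize_password_payload payload)

-- ===== LEMMAS AND PROOFS =====

-- leftmost-min-by-rank merge (identity: none); B's fold is a fold of this operation
def merge2 (a b : Option (Nat × String)) : Option (Nat × String) :=
  match b with
  | none => a
  | some (r, v) =>
    match a with
    | none => some (r, v)
    | some (r0, _) => if r < r0 then some (r, v) else a

-- the (rank, value) contribution of one payload item to field f
def entryE (f : String) (kv : String × Option String) : Option (Nat × String) :=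
  match kv.2 with
  | none => none
  | some v =>
    match (PySem.Dict.ofList pvALIAS).get? kv.1 with
    | none => none
    | some (fl, r) => if fl = f then some (r, v) else none

def foldE (f : String) (L : List (String × Option String)) (a : Option (Nat × String)) :
    Option (Nat × String) :=
  L.foldl (fun x kv => merge2 x (entryE f kv)) a

-- A's per-field scan, with ranks attached to the candidate keys
def fmR (pl : PySem.Dict String (Option String)) : List (Nat × String) → Option (Nat × String)
  | [] => none
  | (r, c) :: rest =>
    match pl.get? c with
    | some (some w) => some (r, w)
    | _ => fmR pl rest

def lookupRank : List (Nat × String) → String → Option Nat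
  | [], _ => none
  | (r, c) :: rest, k => if c == k then some r else lookupRank rest k

def csCur : List (Nat × String) :=
  [(0, "current_password"), (1, "currentPassword"), (2, "current")]
def csNew : List (Nat × String) :=
  [(0, "new_password"), (1, "newPassword"), (2, "new"), (3, "password")]
def csConf : List (Nat × String) :=
  [(0, "confirm_password"), (1, "confirmPassword"), (2, "confirm"),
   (3, "check_password"), (4, "checkPassword"), (5, "check")]

theorem merge2_none_left (b : Option (Nat × String)) : merge2 none b = b := by
  rcases b with _ | ⟨r, v⟩ <;> rfl

theorem merge2_assoc (a b c : Option (Nat × String)) :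
    merge2 (merge2 a b) c = merge2 a (merge2 b c) := by
  rcases a with _ | ⟨r0, v0⟩ <;> rcases b with _ | ⟨r1, v1⟩ <;> rcases c with _ | ⟨r2, v2⟩ <;>
    simp only [merge2] <;> split_ifs <;> simp only [merge2] <;> split_ifs <;>
    first | rfl | omega

theorem foldE_merge (f : String) (L : List (String × Option String))
    (a : Option (Nat × String)) : ∀ b, foldE f L (merge2 a b) = merge2 a (foldE f L b) := by
  induction L with
  | nil => intro b; rfl
  | cons kv L ih =>
      intro b
      show foldE f L (merge2 (merge2 a b) (entryE f kv)) = merge2 a (foldE f L (merge2 b (entryE f kv)))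
      rw [merge2_assoc, ih]

theorem bStep_get? (best : PySem.Dict String (Nat × String)) (kv : String × Option String)
    (f : String) : (bStep best kv).get? f = merge2 (best.get? f) (entryE f kv) := by
  rcases kv with ⟨k, v⟩
  rcases v with _ | w
  · rfl
  · simp only [bStep, entryE]
    rcases h : (PySem.Dict.ofList pvALIAS).get? k with _ | ⟨fl, r⟩
    · rfl
    · by_cases hf : fl = f
      · subst hf
        rcases hb : best.get? fl with _ | ⟨r0, v0⟩
        · simp [hb, PySem.Dict.get?_insert, merge2]
        · simp only [hb]
          split_ifs with hr
          · simp [PySem.Dict.get?_insert, merge2, hr]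
          · simp [hb, merge2, hr]
      · simp only [if_neg hf, merge2]
        have hff : f ≠ fl := fun he => hf he.symm
        rcases hb : best.get? fl with _ | ⟨r0, v0⟩
        · show (best.insert fl (r, w)).get? f = best.get? f
          rw [PySem.Dict.get?_insert]; simp [hff]
        · show (if r < r0 then best.insert fl (r, w) else best).get? f = best.get? f
          split_ifs
          · rw [PySem.Dict.get?_insert]; simp [hff]
          · rfl

theorem foldl_bStep_get? (L : List (String × Option String))
    (f : String) : ∀ best, (L.foldl bStep best).get? f = foldE f L (best.get? f) := by
  induction L with
  | nil => intro best; rfl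
  | cons kv L ih =>
      intro best
      show (L.foldl bStep (bStep best kv)).get? f = foldE f L (merge2 (best.get? f) (entryE f kv))
      rw [ih, bStep_get?]

theorem lookupRank_mem (k : String) : ∀ cs r, lookupRank cs k = some r → r ∈ cs.map (·.1) := by
  intro cs
  induction cs with
  | nil => intro r h; simp [lookupRank] at h
  | cons p rest ih =>
      rcases p with ⟨r0, c0⟩
      intro r h
      simp only [lookupRank] at h
      by_cases hc : (c0 == k) = true
      · simp [hc] at h; simp [h]
      · simp only [Bool.not_eq_true] at hc
        simp only [hc, if_neg] at h
        simp [ih r h]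

theorem fmR_rank_mem (pl : PySem.Dict String (Option String)) :
    ∀ cs r w, fmR pl cs = some (r, w) → r ∈ cs.map (·.1) := by
  intro cs
  induction cs with
  | nil => intro r w h; simp [fmR] at h
  | cons p rest ih =>
      rcases p with ⟨r0, c0⟩
      intro r w h
      simp only [fmR] at h
      rcases hg : pl.get? c0 with _ | u
      · rw [hg] at h; simp [ih r w h]
      · rcases u with _ | w'
        · rw [hg] at h; simp [ih r w h]
        · rw [hg] at h; simp at h; simp [h]

theorem fmR_skip (k : String) (v : Option String) (rest : List (String × Option String)) :
    ∀ cs, (∀ p ∈ cs, (p : Nat × String).2 ≠ k) →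
    fmR (PySem.Dict.mk ((k, v) :: rest)) cs = fmR (PySem.Dict.mk rest) cs := by
  intro cs
  induction cs with
  | nil => intro _; rfl
  | cons p cs ih =>
      rcases p with ⟨r0, c0⟩
      intro h
      have hne : k ≠ c0 := fun he => (h (r0, c0) (by simp)) (by simp [he])
      simp only [fmR, PySem.Dict.get?_mk_cons, beq_iff_eq, if_neg hne]
      rcases (PySem.Dict.mk rest).get? c0 with _ | u
      · exact ih (fun p hp => h p (by simp [hp]))
      · rcases u with _ | w
        · exact ih (fun p hp => h p (by simp [hp]))
        · rfl

theorem fmR_empty : ∀ cs, fmR (PySem.Dict.mk ([] : List (String × Option String))) cs = none := by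
  intro cs
  induction cs with
  | nil => rfl
  | cons p rest ih => rcases p with ⟨r, c⟩; simpa [fmR] using ih

theorem gen_cons (k : String) (v : Option String) (rest : List (String × Option String)) :
    ∀ cs, cs.Pairwise (fun p q => p.1 < q.1) → (cs.map (·.2)).Nodup →
    (PySem.Dict.mk rest).get? k = none →
    fmR (PySem.Dict.mk ((k, v) :: rest)) cs
      = merge2 (v.bind (fun w => (lookupRank cs k).map (fun r => (r, w))))
               (fmR (PySem.Dict.mk rest) cs) := by
  intro cs
  induction cs with
  | nil => intro _ _ _; cases v <;> rfl
  | cons p cs ih =>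
      rcases p with ⟨r0, c0⟩
      intro hp hnd hk
      by_cases hkc : k = c0
      · subst hkc
        have hlook : lookupRank ((r0, k) :: cs) k = some r0 := by simp [lookupRank]
        have hsmall : fmR (PySem.Dict.mk rest) ((r0, k) :: cs) = fmR (PySem.Dict.mk rest) cs := by
          simp [fmR, hk]
        cases v with
        | some w =>
            have hbig : fmR (PySem.Dict.mk ((k, some w) :: rest)) ((r0, k) :: cs)
                = some (r0, w) := by
              simp [fmR, PySem.Dict.get?_mk_cons]
            rw [hbig, hsmall]
            simp only [Option.bind_some, hlook, Option.map_some]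
            rcases hs : fmR (PySem.Dict.mk rest) cs with _ | ⟨r', u⟩
            · rfl
            · have hrm := fmR_rank_mem _ cs r' u hs
              have hlt : r0 < r' := by
                rcases List.pairwise_cons.mp hp with ⟨hl, _⟩
                obtain ⟨q, hq, hq2⟩ := List.mem_map.mp hrm
                have := hl q hq; omega
              simp [merge2, Nat.lt_asymm hlt]
        | none =>
            have hbig : fmR (PySem.Dict.mk ((k, none) :: rest)) ((r0, k) :: cs)
                = fmR (PySem.Dict.mk ((k, none) :: rest)) cs := by
              simp [fmR, PySem.Dict.get?_mk_cons]
            have hskip : fmR (PySem.Dict.mk ((k, none) :: rest)) cs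
                = fmR (PySem.Dict.mk rest) cs := by
              apply fmR_skip
              intro p hp2 he
              exact (List.nodup_cons.mp hnd).1 (List.mem_map.mpr ⟨p, hp2, he⟩)
            rw [hbig, hskip, hsmall]
            rw [show (Option.none : Option String).bind
                (fun w => (lookupRank ((r0, k) :: cs) k).map (fun r => (r, w))) = none from rfl,
              merge2_none_left]
      · have hbigc : (PySem.Dict.mk ((k, v) :: rest)).get? c0 = (PySem.Dict.mk rest).get? c0 := by
          rw [PySem.Dict.get?_mk_cons]; simp [hkc]
        have hlook : lookupRank ((r0, c0) :: cs) k = lookupRank cs k := by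
          have : (c0 == k) = false := beq_eq_false_iff_ne.mpr (fun h => hkc h.symm)
          simp [lookupRank, this]
        rcases hg : (PySem.Dict.mk rest).get? c0 with _ | u
        · have l1 : fmR (PySem.Dict.mk ((k, v) :: rest)) ((r0, c0) :: cs)
              = fmR (PySem.Dict.mk ((k, v) :: rest)) cs := by
            simp [fmR, hbigc, hg]
          have l2 : fmR (PySem.Dict.mk rest) ((r0, c0) :: cs)
              = fmR (PySem.Dict.mk rest) cs := by
            simp [fmR, hg]
          rw [l1, l2, hlook, ih (List.pairwise_cons.mp hp).2 (List.nodup_cons.mp hnd).2 hk]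
        · rcases u with _ | w2
          · have l1 : fmR (PySem.Dict.mk ((k, v) :: rest)) ((r0, c0) :: cs)
                = fmR (PySem.Dict.mk ((k, v) :: rest)) cs := by
              simp [fmR, hbigc, hg]
            have l2 : fmR (PySem.Dict.mk rest) ((r0, c0) :: cs)
                = fmR (PySem.Dict.mk rest) cs := by
              simp [fmR, hg]
            rw [l1, l2, hlook, ih (List.pairwise_cons.mp hp).2 (List.nodup_cons.mp hnd).2 hk]
          · have l1 : fmR (PySem.Dict.mk ((k, v) :: rest)) ((r0, c0) :: cs)
                = some (r0, w2) := by
              simp [fmR, hbigc, hg]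
            have l2 : fmR (PySem.Dict.mk rest) ((r0, c0) :: cs) = some (r0, w2) := by
              simp [fmR, hg]
            rw [l1, l2, hlook]
            cases v with
            | none => rfl
            | some w =>
                rcases hl : lookupRank cs k with _ | r'
                · rfl
                · have hrm := lookupRank_mem k cs r' hl
                  have hlt : r0 < r' := by
                    rcases List.pairwise_cons.mp hp with ⟨hlp, _⟩
                    obtain ⟨q, hq, hq2⟩ := List.mem_map.mp hrm
                    have := hlp q hq; omega
                  simp [merge2, hlt]

theorem foldE_eq_fmR (f : String) (cs : List (Nat × String))
    (hp : cs.Pairwise (fun p q => p.1 < q.1)) (hnd : (cs.map (·.2)).Nodup)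
    (hrel : ∀ k v, entryE f (k, v) = v.bind (fun w => (lookupRank cs k).map (fun r => (r, w)))) :
    ∀ L : List (String × Option String), (L.map (·.1)).Nodup →
    foldE f L none = fmR (PySem.Dict.mk L) cs := by
  intro L
  induction L with
  | nil => intro _; rw [fmR_empty]; rfl
  | cons kv L ih =>
      intro hnodup
      rcases kv with ⟨k, v⟩
      have hk : (PySem.Dict.mk L).get? k = none := by
        rw [PySem.Dict.get?_eq_none_iff_not_mem_keys]
        simpa [PySem.Dict.keys] using (List.nodup_cons.mp hnodup).1
      have h1 : foldE f ((k, v) :: L) none = merge2 (entryE f (k, v)) (foldE f L none) := by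
        show foldE f L (merge2 none (entryE f (k, v))) = _
        rw [merge2_none_left]
        conv_lhs => rw [show entryE f (k, v) = merge2 (entryE f (k, v)) none from rfl]
        rw [foldE_merge]
      rw [h1, ih (List.nodup_cons.mp hnodup).2, hrel,
        gen_cons k v L cs hp hnd hk]

theorem entryE_cur (k : String) (v : Option String) :
    entryE "current_password" (k, v) = v.bind (fun w => (lookupRank csCur k).map (fun r => (r, w))) := by
  cases v with
  | none => rfl
  | some w =>
      by_cases h1 : k = "current_password"; · subst h1; rfl
      by_cases h2 : k = "currentPassword"; · subst h2; rfl
      by_cases h3 : k = "current"; · subst h3; rfl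
      by_cases h4 : k = "new_password"; · subst h4; rfl
      by_cases h5 : k = "newPassword"; · subst h5; rfl
      by_cases h6 : k = "new"; · subst h6; rfl
      by_cases h7 : k = "password"; · subst h7; rfl
      by_cases h8 : k = "confirm_password"; · subst h8; rfl
      by_cases h9 : k = "confirmPassword"; · subst h9; rfl
      by_cases h10 : k = "confirm"; · subst h10; rfl
      by_cases h11 : k = "check_password"; · subst h11; rfl
      by_cases h12 : k = "check"; · subst h12; rfl
      by_cases h13 : k = "checkPassword"; · subst h13; rfl
      have hitems : (PySem.Dict.ofList pvALIAS).items = pvALIAS := rfl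
      have hget : (PySem.Dict.ofList pvALIAS).get? k = none := by
        simp only [PySem.Dict.get?]
        rw [hitems]
        simp [pvALIAS, List.find?, beq_eq_false_iff_ne.mpr (Ne.symm h1), beq_eq_false_iff_ne.mpr (Ne.symm h2), beq_eq_false_iff_ne.mpr (Ne.symm h3), beq_eq_false_iff_ne.mpr (Ne.symm h4), beq_eq_false_iff_ne.mpr (Ne.symm h5), beq_eq_false_iff_ne.mpr (Ne.symm h6), beq_eq_false_iff_ne.mpr (Ne.symm h7), beq_eq_false_iff_ne.mpr (Ne.symm h8), beq_eq_false_iff_ne.mpr (Ne.symm h9), beq_eq_false_iff_ne.mpr (Ne.symm h10), beq_eq_false_iff_ne.mpr (Ne.symm h11), beq_eq_false_iff_ne.mpr (Ne.symm h12), beq_eq_false_iff_ne.mpr (Ne.symm h13)]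
      simp [entryE, hget, lookupRank, csCur, beq_eq_false_iff_ne.mpr (Ne.symm h1), beq_eq_false_iff_ne.mpr (Ne.symm h2), beq_eq_false_iff_ne.mpr (Ne.symm h3), beq_eq_false_iff_ne.mpr (Ne.symm h4), beq_eq_false_iff_ne.mpr (Ne.symm h5), beq_eq_false_iff_ne.mpr (Ne.symm h6), beq_eq_false_iff_ne.mpr (Ne.symm h7), beq_eq_false_iff_ne.mpr (Ne.symm h8), beq_eq_false_iff_ne.mpr (Ne.symm h9), beq_eq_false_iff_ne.mpr (Ne.symm h10), beq_eq_false_iff_ne.mpr (Ne.symm h11), beq_eq_false_iff_ne.mpr (Ne.symm h12), beq_eq_false_iff_ne.mpr (Ne.symm h13)]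

theorem entryE_new (k : String) (v : Option String) :
    entryE "new_password" (k, v) = v.bind (fun w => (lookupRank csNew k).map (fun r => (r, w))) := by
  cases v with
  | none => rfl
  | some w =>
      by_cases h1 : k = "current_password"; · subst h1; rfl
      by_cases h2 : k = "currentPassword"; · subst h2; rfl
      by_cases h3 : k = "current"; · subst h3; rfl
      by_cases h4 : k = "new_password"; · subst h4; rfl
      by_cases h5 : k = "newPassword"; · subst h5; rfl
      by_cases h6 : k = "new"; · subst h6; rfl
      by_cases h7 : k = "password"; · subst h7; rfl
      by_cases h8 : k = "confirm_password"; · subst h8; rfl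
      by_cases h9 : k = "confirmPassword"; · subst h9; rfl
      by_cases h10 : k = "confirm"; · subst h10; rfl
      by_cases h11 : k = "check_password"; · subst h11; rfl
      by_cases h12 : k = "check"; · subst h12; rfl
      by_cases h13 : k = "checkPassword"; · subst h13; rfl
      have hitems : (PySem.Dict.ofList pvALIAS).items = pvALIAS := rfl
      have hget : (PySem.Dict.ofList pvALIAS).get? k = none := by
        simp only [PySem.Dict.get?]
        rw [hitems]
        simp [pvALIAS, List.find?, beq_eq_false_iff_ne.mpr (Ne.symm h1), beq_eq_false_iff_ne.mpr (Ne.symm h2), beq_eq_false_iff_ne.mpr (Ne.symm h3), beq_eq_false_iff_ne.mpr (Ne.symm h4), beq_eq_false_iff_ne.mpr (Ne.symm h5), beq_eq_false_iff_ne.mpr (Ne.symm h6), beq_eq_false_iff_ne.mpr (Ne.symm h7), beq_eq_false_iff_ne.mpr (Ne.symm h8), beq_eq_false_iff_ne.mpr (Ne.symm h9), beq_eq_false_iff_ne.mpr (Ne.symm h10), beq_eq_false_iff_ne.mpr (Ne.symm h11), beq_eq_false_iff_ne.mpr (Ne.symm h12), beq_eq_false_iff_ne.mpr (Ne.symm 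h13)]
      simp [entryE, hget, lookupRank, csNew, beq_eq_false_iff_ne.mpr (Ne.symm h1), beq_eq_false_iff_ne.mpr (Ne.symm h2), beq_eq_false_iff_ne.mpr (Ne.symm h3), beq_eq_false_iff_ne.mpr (Ne.symm h4), beq_eq_false_iff_ne.mpr (Ne.symm h5), beq_eq_false_iff_ne.mpr (Ne.symm h6), beq_eq_false_iff_ne.mpr (Ne.symm h7), beq_eq_false_iff_ne.mpr (Ne.symm h8), beq_eq_false_iff_ne.mpr (Ne.symm h9), beq_eq_false_iff_ne.mpr (Ne.symm h10), beq_eq_false_iff_ne.mpr (Ne.symm h11), beq_eq_false_iff_ne.mpr (Ne.symm h12), beq_eq_false_iff_ne.mpr (Ne.symm h13)]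

theorem entryE_conf (k : String) (v : Option String) :
    entryE "confirm_password" (k, v) = v.bind (fun w => (lookupRank csConf k).map (fun r => (r, w))) := by
  cases v with
  | none => rfl
  | some w =>
      by_cases h1 : k = "current_password"; · subst h1; rfl
      by_cases h2 : k = "currentPassword"; · subst h2; rfl
      by_cases h3 : k = "current"; · subst h3; rfl
      by_cases h4 : k = "new_password"; · subst h4; rfl
      by_cases h5 : k = "newPassword"; · subst h5; rfl
      by_cases h6 : k = "new"; · subst h6; rfl
      by_cases h7 : k = "password"; · subst h7; rfl
      by_cases h8 : k = "confirm_password"; · subst h8; rfl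
      by_cases h9 : k = "confirmPassword"; · subst h9; rfl
      by_cases h10 : k = "confirm"; · subst h10; rfl
      by_cases h11 : k = "check_password"; · subst h11; rfl
      by_cases h12 : k = "check"; · subst h12; rfl
      by_cases h13 : k = "checkPassword"; · subst h13; rfl
      have hitems : (PySem.Dict.ofList pvALIAS).items = pvALIAS := rfl
      have hget : (PySem.Dict.ofList pvALIAS).get? k = none := by
        simp only [PySem.Dict.get?]
        rw [hitems]
        simp [pvALIAS, List.find?, beq_eq_false_iff_ne.mpr (Ne.symm h1), beq_eq_false_iff_ne.mpr (Ne.symm h2), beq_eq_false_iff_ne.mpr (Ne.symm h3), beq_eq_false_iff_ne.mpr (Ne.symm h4), beq_eq_false_iff_ne.mpr (Ne.symm h5), beq_eq_false_iff_ne.mpr (Ne.symm h6), beq_eq_false_iff_ne.mpr (Ne.symm h7), beq_eq_false_iff_ne.mpr (Ne.symm h8), beq_eq_false_iff_ne.mpr (Ne.symm h9), beq_eq_false_iff_ne.mpr (Ne.symm h10), beq_eq_false_iff_ne.mpr (Ne.symm h11), beq_eq_false_iff_ne.mpr (Ne.symm h12), beq_eq_false_iff_ne.mpr (Ne.symm 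h13)]
      simp [entryE, hget, lookupRank, csConf, beq_eq_false_iff_ne.mpr (Ne.symm h1), beq_eq_false_iff_ne.mpr (Ne.symm h2), beq_eq_false_iff_ne.mpr (Ne.symm h3), beq_eq_false_iff_ne.mpr (Ne.symm h4), beq_eq_false_iff_ne.mpr (Ne.symm h5), beq_eq_false_iff_ne.mpr (Ne.symm h6), beq_eq_false_iff_ne.mpr (Ne.symm h7), beq_eq_false_iff_ne.mpr (Ne.symm h8), beq_eq_false_iff_ne.mpr (Ne.symm h9), beq_eq_false_iff_ne.mpr (Ne.symm h10), beq_eq_false_iff_ne.mpr (Ne.symm h11), beq_eq_false_iff_ne.mpr (Ne.symm h12), beq_eq_false_iff_ne.mpr (Ne.symm h13)]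

theorem fillA_eq (pl : PySem.Dict String (Option String)) (f : String)
    (d : PySem.Dict String (Option String)) :
    ∀ cs : List (Nat × String), fillA pl f d (cs.map (·.2)) =
      match fmR pl cs with
      | none => d
      | some (_, w) => d.insert f (some w) := by
  intro cs
  induction cs with
  | nil => rfl
  | cons p cs ih =>
      rcases p with ⟨r0, c0⟩
      show (if pl.contains c0 && (pl.getD c0 none).isSome then d.insert f (pl.getD c0 none)
            else fillA pl f d (cs.map (·.2))) = _
      rw [PySem.Dict.contains_eq_isSome_get?, PySem.Dict.getD_eq_get?_getD]
      rcases hg : pl.get? c0 with _ | u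
      · simpa [fmR, hg] using ih
      · rcases u with _ | w
        · simpa [fmR, hg] using ih
        · simp [fmR, hg]

-- per-field result of B's fold, as A's ranked scan
theorem best_get (payload : List (String × Option String)) (f : String)
    (cs : List (Nat × String))
    (hp : cs.Pairwise (fun p q => p.1 < q.1)) (hnd : (cs.map (·.2)).Nodup)
    (hrel : ∀ k v, entryE f (k, v) = v.bind (fun w => (lookupRank cs k).map (fun r => (r, w)))) :
    (((PySem.Dict.ofList payload).items.foldl bStep PySem.Dict.empty).get? f)
      = fmR (PySem.Dict.ofList payload) cs := by
  rw [foldl_bStep_get?]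
  have hnodup : ((PySem.Dict.ofList payload).items.map (·.1)).Nodup := by
    simpa [PySem.Dict.keys] using PySem.Dict.nodup_keys_ofList payload
  have h := foldE_eq_fmR f cs hp hnd hrel (PySem.Dict.ofList payload).items hnodup
  simpa [PySem.Dict.get?_empty] using h

-- ===== VERDICT (by name: the statement is the Claim_ definition above) =====
theorem normalize_password_payload_spec : Claim_equal_normalize_password_payload := by
  intro payload _
  unfold Spec_normalize_password_payload normalize_password_payload normalize_password_payload_alt
  have hc := best_get payload "current_password" csCur (by decide) (by decide) entryE_cur
  have hn := best_get payload "new_password" csNew (by decide) (by decide) entryE_new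
  have hf := best_get payload "confirm_password" csConf (by decide) (by decide) entryE_conf
  have ec : ["current_password", "currentPassword", "current"] = csCur.map (·.2) := rfl
  have en : ["new_password", "newPassword", "new", "password"] = csNew.map (·.2) := rfl
  have ef : ["confirm_password", "confirmPassword", "confirm", "check_password", "checkPassword", "check"]
      = csConf.map (·.2) := rfl
  simp only [List.map, hc, hn, hf, ec, en, ef, fillA_eq]
  rcases h1 : fmR (PySem.Dict.ofList payload) csCur with _ | ⟨r1, v1⟩ <;>
  rcases h2 : fmR (PySem.Dict.ofList payload) csNew with _ | ⟨r2, v2⟩ <;>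
  rcases h3 : fmR (PySem.Dict.ofList payload) csConf with _ | ⟨r3, v3⟩ <;> rfl
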